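-- pv_equiv track=rewrite | github.com/genomewalker/dart | scripts/train_strand_classifier.py | count_internal_stops
-- ===== SOURCE A (Python) =====
-- STOP_CODONS = {"TAA", "TAG", "TGA"}
--
-- def count_internal_stops(seq, frame):
--     """Count internal stop codons."""
--     codons = []
--     for i in range(frame, len(seq) - 2, 3):
--         codon = seq[i : i + 3].upper()
--         if all(c in "ACGT" for c in codon):
--             codons.append(codon)
--     if len(codons) <= 1:
--         return 0
--     return sum(1 for c in codons[:-1] if c in STOP_CODONS)
-- ===== SOURCE B (Python) =====
-- STOP_CODONS = {"TAA", "TAG", "TGA"}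
--
-- def count_internal_stops(seq, frame):
--     """Count internal stop codons (total-minus-last-adjustment, single pass, no list)."""
--     total = 0
--     last_is_stop = False
--     for i in range(frame, len(seq) - 2, 3):
--         codon = seq[i : i + 3].upper()
--         if all(c in "ACGT" for c in codon):
--             last_is_stop = codon in STOP_CODONS
--             if last_is_stop:
--                 total += 1
--     return total - 1 if last_is_stop else total
-- ===== Notes on version B (the rewrite author's own statement) =====
-- stated objective: simpler
-- what changed: Instead of building a list of valid codons, slicing off the last and re-scanning it for stops, B keeps a running stop count plus a flag for whether the last valid codon was a stop and subtracts that flag at the end; the intermediate list, the slice and the len<=1 guard disappear.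
import Mathlib
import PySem

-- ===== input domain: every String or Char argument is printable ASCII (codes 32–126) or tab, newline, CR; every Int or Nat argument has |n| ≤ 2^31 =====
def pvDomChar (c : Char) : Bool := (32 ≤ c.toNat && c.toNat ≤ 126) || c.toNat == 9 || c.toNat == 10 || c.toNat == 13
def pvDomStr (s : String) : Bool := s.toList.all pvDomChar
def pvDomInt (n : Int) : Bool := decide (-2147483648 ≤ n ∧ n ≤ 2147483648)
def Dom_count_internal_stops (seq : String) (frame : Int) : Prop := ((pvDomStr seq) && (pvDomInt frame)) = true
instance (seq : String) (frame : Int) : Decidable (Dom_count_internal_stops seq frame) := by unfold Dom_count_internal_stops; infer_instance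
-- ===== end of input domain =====

-- B replaces A's build-list-then-slice-and-rescan by a single pass keeping a running stop
-- count and a last-valid-codon-was-a-stop flag, subtracted at the end (simpler, O(1) space).


-- ===== PORT A =====
-- shared helpers (the same expressions occur verbatim in both Pythons):
-- seq[i:i+3].upper()  (strings handled on the List Char side, per PySem convention)
def pvCodon (s : List Char) (i : Int) : List Char :=
  PySem.Chars.upper (PySem.Chars.slice s (some i) (some (i + 3)))
-- all(c in "ACGT" for c in codon)  ('c in "ACGT"' on a 1-char c is char membership; exact)
def pvValid (cd : List Char) : Bool := cd.all (fun c => ['A', 'C', 'G', 'T'].contains c)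
-- STOP_CODONS = {"TAA", "TAG", "TGA"} (a set used only for membership tests)
def pvIsStop (cd : List Char) : Bool :=
  [['T','A','A'], ['T','A','G'], ['T','G','A']].contains cd

def count_internal_stops (seq : String) (frame : Int) : Int :=
  let s := seq.toList
  let codons := (PySem.List.pyRange frame (PySem.Str.len seq - 2) 3).foldl
    (fun acc i =>
      let codon := pvCodon s i
      if pvValid codon then acc ++ [codon] else acc) []
  if codons.length ≤ 1 then 0
  -- sum(1 for c in codons[:-1] if c in STOP_CODONS)
  else (((PySem.List.slice codons none (some (-1))).filter pvIsStop).length : Int)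

-- ===== PORT B =====
def count_internal_stops_alt (seq : String) (frame : Int) : Int :=
  let s := seq.toList
  let st := (PySem.List.pyRange frame (PySem.Str.len seq - 2) 3).foldl
    (fun (st : Int × Bool) i =>
      let codon := pvCodon s i
      if pvValid codon then
        (if pvIsStop codon then (st.1 + 1, true) else (st.1, false))
      else st) (0, false)
  if st.2 then st.1 - 1 else st.1

-- ===== PRECONDITION & SPEC =====
def Spec_count_internal_stops (seq : String) (frame : Int) (out : Int) : Prop := out = count_internal_stops_alt seq frame
instance (seq : String) (frame : Int) (out : Int) : Decidable (Spec_count_internal_stops seq frame out) := by unfold Spec_count_internal_stops; infer_instance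

-- ===== CLAIM (what is proved, stated in full; the proofs are below) =====
def Claim_equal_count_internal_stops : Prop := ∀ (seq : String) (frame : Int), Dom_count_internal_stops seq frame → Spec_count_internal_stops seq frame (count_internal_stops seq frame)

-- ===== LEMMAS AND PROOFS =====

-- stop count of a codon list, and "is the last codon a stop (default b)"
def pvStops (xs : List (List Char)) : Int := ((xs.filter pvIsStop).length : Int)
def pvLastD (b : Bool) (xs : List (List Char)) : Bool := (xs.getLast?).elim b pvIsStop

theorem pvLastD_cons (b : Bool) (c : List Char) (xs : List (List Char)) :
    pvLastD b (c :: xs) = pvLastD (pvIsStop c) xs := by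
  cases xs <;> simp [pvLastD, List.getLast?_cons]

-- B's fold computes (running stops, last-valid-is-stop) of the codon list A builds
theorem b_fold (s : List Char) :
    ∀ (L : List Int) (t : Int) (b : Bool),
      L.foldl
        (fun (st : Int × Bool) i =>
          let codon := pvCodon s i
          if pvValid codon then
            (if pvIsStop codon then (st.1 + 1, true) else (st.1, false))
          else st) (t, b)
      = (t + pvStops ((L.filter (fun i => pvValid (pvCodon s i))).map (pvCodon s)),
         pvLastD b ((L.filter (fun i => pvValid (pvCodon s i))).map (pvCodon s))) := by
  intro L
  induction L with
  | nil => intro t b; simp [pvStops, pvLastD]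
  | cons i L ih =>
    intro t b
    by_cases h : pvValid (pvCodon s i) = true
    · by_cases hst : pvIsStop (pvCodon s i) = true
      · simp only [List.foldl_cons, List.filter_cons, h, hst, if_true, List.map_cons]
        rw [ih, pvLastD_cons]
        simp [pvStops, hst]
        ring
      · simp only [List.foldl_cons, List.filter_cons, h, hst, if_true, Bool.false_eq_true,
          if_false, List.map_cons]
        rw [ih, pvLastD_cons]
        simp [pvStops, hst]
    · simp only [List.foldl_cons, List.filter_cons, h, Bool.false_eq_true, if_false, ih]

-- the final-adjustment identity: A's "drop the last codon then count stops" equals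
-- B's "count all stops, subtract one if the last codon is a stop"
theorem final_eq (xs : List (List Char)) :
    (if xs.length ≤ 1 then (0 : Int)
     else (((PySem.List.slice xs none (some (-1))).filter pvIsStop).length : Int))
    = (if pvLastD false xs then pvStops xs - 1 else pvStops xs) := by
  rw [PySem.List.slice_to_neg_one]
  rcases List.eq_nil_or_concat xs with hnil | ⟨ys, c, rfl⟩
  · subst hnil; simp [pvStops, pvLastD]
  · simp only [List.concat_eq_append]
    rw [List.dropLast_concat]
    have hlast : pvLastD false (ys ++ [c]) = pvIsStop c := by simp [pvLastD]
    have hstops : pvStops (ys ++ [c]) =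
        pvStops ys + (if pvIsStop c then 1 else 0) := by
      simp [pvStops, List.filter_append]
      split_ifs <;> simp_all
    rw [hlast, hstops]
    rcases List.eq_nil_or_concat ys with hnil | ⟨zs, d, rfl⟩
    · subst hnil
      simp only [List.nil_append, pvStops, List.filter_nil, List.length_nil]
      split_ifs <;> simp
    · simp only [List.concat_eq_append]
      have hlen : ¬ (zs ++ [d] ++ [c]).length ≤ 1 := by simp
      rw [if_neg hlen]
      split_ifs <;> simp [pvStops]

-- ===== VERDICT (by name: the statement is the Claim_ definition above) =====
theorem count_internal_stops_spec : Claim_equal_count_internal_stops := by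
  intro seq frame _
  simp only [Spec_count_internal_stops, count_internal_stops, count_internal_stops_alt]
  rw [PySem.List.foldl_append_if (fun i => pvValid (pvCodon seq.toList i)) (pvCodon seq.toList)]
  rw [b_fold]
  simp only [List.nil_append, Int.zero_add]
  exact final_eq _
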